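-- pv_equiv track=rewrite | github.com/MuhammadUsama-Hassan/Data-Scrapping | compare_website_file.py | mtch_cars
-- ===== SOURCE A (Python) =====
-- def String_Normal_data(value):
--     if value is None:
--         return ''
--     return value.strip().lower()
--
-- def mtch_cars(first_data_1, second_data_2):
--     matching_data = []
--
--     for my_car_1 in first_data_1:
--         for my_car_2 in second_data_2:
--             if (
--                 String_Normal_data(my_car_1.get("city")) == String_Normal_data(my_car_2.get("city")) and
--                 String_Normal_data(my_car_1.get("make")) == String_Normal_data(my_car_2.get("make")) and
--                 String_Normal_data(my_car_1.get("model")) == String_Normal_data(my_car_2.get("model")) and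
--                 String_Normal_data(my_car_1.get("year")) == String_Normal_data(my_car_2.get("year"))
--             ):
--                 matching_data.append({
--                     "city": my_car_1.get("city"),
--                     "year": my_car_1.get("year"),
--                     "make": my_car_1.get("make"),
--                     "model": my_car_1.get("model"),
--                     "Pakwheels_Price": my_car_1.get("price"),
--                     "PKMotors_Price": my_car_2.get("price")
--                 })
--     return matching_data
-- ===== SOURCE B (Python) =====
-- def String_Normal_data(value):
--     if value is None:
--         return ''
--     return value.strip().lower()
--
-- def _key(car):
--     return (
--         String_Normal_data(car.get("city")),
--         String_Normal_data(car.get("make")),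
--         String_Normal_data(car.get("model")),
--         String_Normal_data(car.get("year")),
--     )
--
-- def mtch_cars(first_data_1, second_data_2):
--     index = {}
--     for my_car_2 in second_data_2:
--         index.setdefault(_key(my_car_2), []).append(my_car_2.get("price"))
--     matching_data = []
--     for my_car_1 in first_data_1:
--         for price_2 in index.get(_key(my_car_1), []):
--             matching_data.append({
--                 "city": my_car_1.get("city"),
--                 "year": my_car_1.get("year"),
--                 "make": my_car_1.get("make"),
--                 "model": my_car_1.get("model"),
--                 "Pakwheels_Price": my_car_1.get("price"),
--                 "PKMotors_Price": price_2
--             })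
--     return matching_data
-- ===== Notes on version B (the rewrite author's own statement) =====
-- stated objective: faster
-- what changed: Replaces the nested O(n*m) scan with a hash-join: the second list is indexed once into a dict keyed by the normalized (city, make, model, year) tuple mapping to its prices in order, and each first-list car does one lookup.
import Mathlib
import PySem

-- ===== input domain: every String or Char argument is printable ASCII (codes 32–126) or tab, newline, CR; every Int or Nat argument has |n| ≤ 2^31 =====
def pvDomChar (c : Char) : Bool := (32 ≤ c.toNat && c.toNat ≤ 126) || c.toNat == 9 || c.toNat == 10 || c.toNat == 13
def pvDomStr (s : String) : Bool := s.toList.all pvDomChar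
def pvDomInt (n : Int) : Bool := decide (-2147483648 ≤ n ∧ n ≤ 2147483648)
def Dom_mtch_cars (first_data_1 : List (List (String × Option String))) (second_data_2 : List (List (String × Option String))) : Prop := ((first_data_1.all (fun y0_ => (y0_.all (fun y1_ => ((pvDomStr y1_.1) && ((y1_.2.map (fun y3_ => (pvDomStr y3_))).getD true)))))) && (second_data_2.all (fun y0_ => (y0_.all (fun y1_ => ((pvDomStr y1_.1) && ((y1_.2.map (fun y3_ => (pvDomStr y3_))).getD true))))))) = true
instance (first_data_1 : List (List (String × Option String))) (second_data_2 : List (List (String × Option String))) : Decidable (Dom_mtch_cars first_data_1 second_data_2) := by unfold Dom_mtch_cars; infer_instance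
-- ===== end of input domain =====

-- B replaces A's nested O(n*m) scan by a hash-join: index the second list once by
-- normalized (city, make, model, year), then one lookup per first-list car (objective: faster).

-- shared helpers: Python's String_Normal_data, dict .get(k) (first match, None if absent),
-- and the result-row constructor (a dict with six distinct literal keys, in insertion order)
def pvNorm (value : Option String) : String :=
  match value with
  | none => ""
  | some v => PySem.Str.lower (PySem.Str.strip v)

def pvGet (car : List (String × Option String)) (k : String) : Option String :=
  match car.find? (fun p => p.1 == k) with
  | some p => p.2
  | none => none

def pvMkRow (c1 : List (String × Option String)) (price2 : Option String) : List (String × Option String) :=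
  [("city", pvGet c1 "city"), ("year", pvGet c1 "year"), ("make", pvGet c1 "make"),
   ("model", pvGet c1 "model"), ("Pakwheels_Price", pvGet c1 "price"), ("PKMotors_Price", price2)]

-- ===== PORT A =====
def mtch_cars (first_data_1 : List (List (String × Option String))) (second_data_2 : List (List (String × Option String))) : List (List (String × Option String)) :=
  first_data_1.foldl (fun matching_data my_car_1 =>
    second_data_2.foldl (fun matching_data my_car_2 =>
      if pvNorm (pvGet my_car_1 "city") == pvNorm (pvGet my_car_2 "city") &&
         pvNorm (pvGet my_car_1 "make") == pvNorm (pvGet my_car_2 "make") &&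
         pvNorm (pvGet my_car_1 "model") == pvNorm (pvGet my_car_2 "model") &&
         pvNorm (pvGet my_car_1 "year") == pvNorm (pvGet my_car_2 "year")
      then matching_data ++ [pvMkRow my_car_1 (pvGet my_car_2 "price")]
      else matching_data) matching_data) []

-- ===== PORT B =====
def pvKey (car : List (String × Option String)) : String × String × String × String :=
  (pvNorm (pvGet car "city"), pvNorm (pvGet car "make"),
   pvNorm (pvGet car "model"), pvNorm (pvGet car "year"))

-- the index: key -> prices of second-list cars with that key, in order (Python's setdefault(...).append)
def pvIndex (second_data_2 : List (List (String × Option String))) : PySem.Dict (String × String × String × String) (List (Option String)) :=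
  second_data_2.foldl (fun d my_car_2 =>
    d.insert (pvKey my_car_2) (d.getD (pvKey my_car_2) [] ++ [pvGet my_car_2 "price"]))
    PySem.Dict.empty

def mtch_cars_alt (first_data_1 : List (List (String × Option String))) (second_data_2 : List (List (String × Option String))) : List (List (String × Option String)) :=
  let index := pvIndex second_data_2
  first_data_1.foldl (fun matching_data my_car_1 =>
    (index.getD (pvKey my_car_1) []).foldl (fun matching_data price_2 =>
      matching_data ++ [pvMkRow my_car_1 price_2]) matching_data) []

-- ===== PRECONDITION & SPEC =====
def Spec_mtch_cars (first_data_1 : List (List (String × Option String))) (second_data_2 : List (List (String × Option String))) (out : List (List (String × Option String))) : Prop := out = mtch_cars_alt first_data_1 second_data_2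
instance (first_data_1 : List (List (String × Option String))) (second_data_2 : List (List (String × Option String))) (out : List (List (String × Option String))) : Decidable (Spec_mtch_cars first_data_1 second_data_2 out) := by unfold Spec_mtch_cars; infer_instance

-- ===== CLAIM (what is proved, stated in full; the proofs are below) =====
def Claim_equal_mtch_cars : Prop := ∀ (first_data_1 : List (List (String × Option String))) (second_data_2 : List (List (String × Option String))), Dom_mtch_cars first_data_1 second_data_2 → Spec_mtch_cars first_data_1 second_data_2 (mtch_cars first_data_1 second_data_2)

-- ===== LEMMAS AND PROOFS =====

-- A's four-way normalized comparison is equality of the normalized key tuples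
theorem pvCond_eq_key (c1 c2 : List (String × Option String)) :
    (pvNorm (pvGet c1 "city") == pvNorm (pvGet c2 "city") &&
     pvNorm (pvGet c1 "make") == pvNorm (pvGet c2 "make") &&
     pvNorm (pvGet c1 "model") == pvNorm (pvGet c2 "model") &&
     pvNorm (pvGet c1 "year") == pvNorm (pvGet c2 "year")) = (pvKey c2 == pvKey c1) := by
  rw [Bool.eq_iff_iff]
  simp only [Bool.and_eq_true, beq_iff_eq, pvKey, Prod.mk.injEq]
  constructor <;> intro h <;> simp_all [eq_comm]

-- the index built by B maps each key to the prices of the second-list cars with that key, in order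
theorem pvIndex_getD (s : List (List (String × Option String)))
    (d : PySem.Dict (String × String × String × String) (List (Option String)))
    (k : String × String × String × String) :
    (s.foldl (fun d c => d.insert (pvKey c) (d.getD (pvKey c) [] ++ [pvGet c "price"])) d).getD k []
      = d.getD k [] ++ (s.filter (fun c => pvKey c == k)).map (fun c => pvGet c "price") := by
  induction s generalizing d with
  | nil => simp
  | cons c s ih =>
    simp only [List.foldl_cons, List.filter_cons]
    rw [ih, PySem.Dict.getD_insert]
    by_cases h : k = pvKey c
    · subst h; simp
    · have h' : ¬ pvKey c = k := fun e => h e.symm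
      simp [h, h']

theorem mtch_cars_eq_alt (f s : List (List (String × Option String))) :
    mtch_cars f s = mtch_cars_alt f s := by
  unfold mtch_cars mtch_cars_alt pvIndex
  apply PySem.List.foldl_congr_mem
  intro acc c1 _
  rw [PySem.List.foldl_append_if, pvIndex_getD, PySem.Dict.getD_empty,
      List.nil_append, PySem.List.foldl_append_singleton_eq_map, List.map_map,
      List.filter_congr (fun c2 _ => pvCond_eq_key c1 c2)]
  -- the row built from c2's price equals the row A builds from c2 directly
  rfl

-- ===== VERDICT (by name: the statement is the Claim_ definition above) =====
theorem mtch_cars_spec : Claim_equal_mtch_cars := by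
  intro f s _
  exact mtch_cars_eq_alt f s
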